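-- pv_equiv track=rewrite | github.com/henkvanvoorst92/utils | utils.py | rename_duplicate_IDs
-- ===== SOURCE A (Python) =====
-- def rename_duplicate_IDs(ids):
--     count_dict = {}  # To track the counts of each ID
--     renamed_ids = []  # To store the renamed IDs
--     for id in ids:
--         if id in count_dict:
--             # Increment the count for this ID
--             count_dict[id] += 1
--             # Append a letter to the ID based on its occurrence count
--             renamed_ids.append(f"{id}-{chr(96 + count_dict[id])}")
--         else:
--             # Add the ID to the dictionary with a count of 1
--             count_dict[id] = 1
--             # Keep the first occurrence of the ID unchanged
--             renamed_ids.append(id)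
--     return renamed_ids
-- ===== SOURCE B (Python) =====
-- def rename_duplicate_IDs(ids):
--     # pass 1: group the positions of each ID (keyed by ID, insertion order)
--     groups = {}
--     for i, id in enumerate(ids):
--         groups.setdefault(id, []).append(i)
--     # pass 2: fill an output array group by group
--     out = [""] * len(ids)
--     for id, idxs in groups.items():
--         out[idxs[0]] = id
--         for j, i in enumerate(idxs[1:], start=2):
--             out[i] = f"{id}-{chr(96 + j)}"
--     return out
-- ===== Notes on version B (the rewrite author's own statement) =====
-- stated objective: alternative
-- what changed: Replaces A's single pass with a running counter dict by a two-phase group-and-scatter algorithm: first group the positions of each ID into a dict of index lists, then fill a preallocated output array group by group, writing the first position unchanged and later positions with their letter suffix.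
import Mathlib
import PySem

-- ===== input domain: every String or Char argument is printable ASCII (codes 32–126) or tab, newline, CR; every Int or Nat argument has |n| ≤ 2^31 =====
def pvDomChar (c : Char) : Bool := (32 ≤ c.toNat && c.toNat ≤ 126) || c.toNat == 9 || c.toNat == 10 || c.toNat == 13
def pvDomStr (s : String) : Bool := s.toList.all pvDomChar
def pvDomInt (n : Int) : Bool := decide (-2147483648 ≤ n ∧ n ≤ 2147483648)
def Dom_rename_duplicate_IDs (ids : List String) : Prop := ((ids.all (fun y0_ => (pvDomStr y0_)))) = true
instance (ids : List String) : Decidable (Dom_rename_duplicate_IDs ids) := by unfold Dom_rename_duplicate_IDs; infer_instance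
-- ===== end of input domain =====

-- B replaces A's single counting pass by a two-phase group-and-scatter algorithm
-- (group positions by ID, then fill a preallocated output array group by group);
-- objective: alternative (same asymptotic cost, different algorithmic structure).

-- ===== PORT A =====
-- loop body of A's for-loop (dict of counts, accumulated output)
def stepA (st : PySem.Dict String Int × List String) (id : String) :
    PySem.Dict String Int × List String :=
  if st.1.contains id then
    -- count_dict[id] += 1  (key is present here, so d[id] = d[id] + 1)
    let c := st.1.getD id 0 + 1
    (st.1.insert id c, st.2 ++ [id ++ "-" ++ (Char.ofNat (96 + c).toNat).toString])
  else
    (st.1.insert id 1, st.2 ++ [id])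

def rename_duplicate_IDs (ids : List String) : List String :=
  (ids.foldl stepA (PySem.Dict.empty, [])).2

-- ===== PORT B =====
-- pass 1 body: groups.setdefault(id, []).append(i) — the stored list gains i at the end,
-- a fresh key is appended to the dict; Dict.insert of the extended list is exactly that effect
def groupStep (g : PySem.Dict String (List Int)) (q : Int × String) :
    PySem.Dict String (List Int) :=
  g.insert q.2 (g.getD q.2 [] ++ [q.1])

-- pass 2 body: write one group's positions into out (indices come from enumerate,
-- hence nonnegative, so .toNat is exact; the [] branch is a totality guard Python
-- never reaches because every stored index list is nonempty)
def writeGroup (out : List String) (p : String × List Int) : List String :=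
  match p.2 with
  | [] => out
  | i0 :: rest =>
      (PySem.List.enumerate rest 2).foldl
        (fun o q => o.set q.2.toNat (p.1 ++ "-" ++ (Char.ofNat (96 + q.1).toNat).toString))
        (out.set i0.toNat p.1)

def rename_duplicate_IDs_alt (ids : List String) : List String :=
  let groups := (PySem.List.enumerate ids 0).foldl groupStep PySem.Dict.empty
  groups.items.foldl writeGroup (List.replicate ids.length "")

-- ===== PRECONDITION & SPEC =====
def Spec_rename_duplicate_IDs (ids : List String) (out : List String) : Prop := out = rename_duplicate_IDs_alt ids
instance (ids : List String) (out : List String) : Decidable (Spec_rename_duplicate_IDs ids out) := by unfold Spec_rename_duplicate_IDs; infer_instance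

-- ===== CLAIM (what is proved, stated in full; the proofs are below) =====
def Claim_equal_rename_duplicate_IDs : Prop := ∀ (ids : List String), Dom_rename_duplicate_IDs ids → Spec_rename_duplicate_IDs ids (rename_duplicate_IDs ids)

-- ===== LEMMAS AND PROOFS =====

-- common reference function: rename l given an already-processed prefix p
def gRen (p l : List String) : List String :=
  match l with
  | [] => []
  | x :: l =>
    (if p.count x = 0 then x else x ++ "-" ++ (Char.ofNat (97 + p.count x)).toString)
      :: gRen (p ++ [x]) l

-- positionwise reference (the per-index closed form): the bridge between A and B
def refB (ids : List String) : List String :=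
  (PySem.List.enumerate ids 0).map (fun q =>
    let k := (PySem.List.slice ids none (some q.1)).count q.2
    if k = 0 then q.2 else q.2 ++ "-" ++ (Char.ofNat (97 + k)).toString)

-- the ascending list of the positions of x in ids
def natIdx (ids : List String) (x : String) : List Nat :=
  (List.range ids.length).filter (fun i => ids.getD i "" == x)

---------------------------------------------------------------- A = gRen []

lemma loopA_eq_gRen (l : List String) :
    ∀ (p : List String) (d : PySem.Dict String Int) (out : List String),
      (∀ s, d.contains s = decide (p.count s ≠ 0)) →
      (∀ s, d.getD s 0 = (p.count s : Int)) →
      (l.foldl stepA (d, out)).2 = out ++ gRen p l := by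
  induction l with
  | nil => intro p d out _ _; simp [gRen]
  | cons x l ih =>
    intro p d out hc hg
    simp only [List.foldl_cons]
    by_cases hp : p.count x = 0
    · have hcx : d.contains x = false := by simp [hc, hp]
      have hstep : stepA (d, out) x = (d.insert x 1, out ++ [x]) := by
        simp [stepA, hcx]
      rw [hstep, ih (p ++ [x])]
      · simp [gRen, hp]
      · intro s
        rw [PySem.Dict.contains_insert]
        by_cases hs : s = x
        · subst hs; simp
        · simp [hs, hc, Ne.symm hs]
      · intro s
        rw [PySem.Dict.getD_insert]
        by_cases hs : s = x
        · subst hs; simp [hp]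
        · simp [hs, hg, Ne.symm hs]
    · have hcx : d.contains x = true := by simp [hc, hp]
      have hstep : stepA (d, out) x =
          (d.insert x ((p.count x : Int) + 1),
           out ++ [x ++ "-" ++ (Char.ofNat (97 + p.count x)).toString]) := by
        simp only [stepA, hcx, if_pos, hg]
        have : ((96 : Int) + ((p.count x : Int) + 1)).toNat = 97 + p.count x := by omega
        rw [this]
      rw [hstep, ih (p ++ [x])]
      · simp [gRen, hp]
      · intro s
        rw [PySem.Dict.contains_insert]
        by_cases hs : s = x
        · subst hs; simp [hp]
        · simp [hs, hc, Ne.symm hs]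
      · intro s
        rw [PySem.Dict.getD_insert]
        by_cases hs : s = x
        · subst hs; simp
        · simp [hs, hg, Ne.symm hs]

lemma A_eq_gRen (ids : List String) : rename_duplicate_IDs ids = gRen [] ids := by
  unfold rename_duplicate_IDs
  rw [loopA_eq_gRen ids [] PySem.Dict.empty []]
  · simp
  · intro s; simp
  · intro s; simp

---------------------------------------------------------------- refB = gRen []

lemma refB_loop (l : List String) :
    ∀ (p : List String),
      (PySem.List.enumerate l (p.length : Int)).map (fun q =>
        let k := (PySem.List.slice (p ++ l) none (some q.1)).count q.2
        if k = 0 then q.2 else q.2 ++ "-" ++ (Char.ofNat (97 + k)).toString)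
      = gRen p l := by
  induction l with
  | nil => intro p; simp [PySem.List.enumerate_nil, gRen]
  | cons x l ih =>
    intro p
    rw [PySem.List.enumerate_cons]
    simp only [List.map_cons, gRen]
    have hsl : PySem.List.slice (p ++ x :: l) none (some (p.length : Int)) = p := by
      rw [PySem.List.slice_to_natCast]
      simp
    rw [hsl]
    refine congrArg₂ List.cons rfl ?_
    have h1 : ((p.length : Int) + 1) = (((p ++ [x]).length : Nat) : Int) := by simp
    have h2 : p ++ x :: l = (p ++ [x]) ++ l := by simp
    rw [h1, h2, ← ih (p ++ [x])]

lemma refB_eq_gRen (ids : List String) : refB ids = gRen [] ids := by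
  unfold refB
  have := refB_loop ids []
  simpa using this

---------------------------------------------------------------- natIdx facts

lemma natIdx_append_singleton (p : List String) (a x : String) :
    natIdx (p ++ [a]) x = natIdx p x ++ (if a == x then [p.length] else []) := by
  unfold natIdx
  rw [List.length_append, List.length_singleton, List.range_succ, List.filter_append]
  congr 1
  · apply List.filter_congr
    intro i hi
    rw [List.mem_range] at hi
    rw [List.getD_append _ _ _ _ hi]
  · simp [List.filter_singleton, List.getElem?_concat_length, beq_iff_eq]

lemma mem_natIdx {ids : List String} {x : String} {i : Nat} (h : i ∈ natIdx ids x) :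
    i < ids.length ∧ ids.getD i "" = x := by
  unfold natIdx at h
  simp only [List.mem_filter, List.mem_range, beq_iff_eq] at h
  exact h

lemma nodup_natIdx (ids : List String) (x : String) : (natIdx ids x).Nodup :=
  (List.nodup_range).filter _

-- count of x in a prefix = number of earlier positions holding x
lemma count_take (ids : List String) (x : String) :
    ∀ j, j ≤ ids.length →
      (ids.take j).count x
        = ((List.range j).filter (fun i => ids.getD i "" == x)).length := by
  intro j
  induction j with
  | zero => intro _; simp
  | succ j ih =>
    intro hj
    have hjl : j < ids.length := by omega
    rw [List.range_succ, List.filter_append,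
        List.take_succ, List.count_append, List.length_append,
        ih (by omega)]
    congr 1
    have : ids[j]? = some ids[j] := List.getElem?_eq_getElem hjl
    rw [this]
    by_cases hx : ids[j] = x
    · simp [List.filter_singleton, this, hx]
    · simp [List.filter_singleton, this, hx]

-- rank lemma: the r-th position of x has exactly r earlier positions of x
lemma rank_filter_range (P : Nat → Bool) :
    ∀ (n : Nat) (r : Nat), r < ((List.range n).filter P).length →
      ((List.range (((List.range n).filter P).getD r 0)).filter P).length = r := by
  intro n
  induction n with
  | zero => intro r h; simp at h
  | succ n ih =>
    intro r h
    rw [List.range_succ, List.filter_append] at h ⊢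
    by_cases hr : r < ((List.range n).filter P).length
    · rw [List.getD_append _ _ _ _ hr]
      exact ih r hr
    · have hP : P n = true := by
        by_contra hPn
        simp [List.filter_singleton, hPn] at h
        omega
      have hlen : (List.filter P [n]).length = 1 := by simp [List.filter_singleton, hP]
      have hreq : r = ((List.range n).filter P).length := by
        rw [List.length_append, hlen] at h; omega
      have hget : (((List.range n).filter P) ++ List.filter P [n]).getD r 0 = n := by
        rw [hreq, List.getD_append_right _ _ _ _ le_rfl]
        simp [List.filter_singleton, hP]
      rw [hget, hreq]

lemma rank_natIdx (ids : List String) (x : String) (r : Nat)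
    (h : r < (natIdx ids x).length) :
    (ids.take ((natIdx ids x)[r])).count x = r := by
  have hmem : (natIdx ids x)[r] ∈ natIdx ids x := List.getElem_mem h
  have hlt := (mem_natIdx hmem).1
  rw [count_take ids x _ (le_of_lt hlt)]
  have hd : (natIdx ids x)[r] = (natIdx ids x).getD r 0 :=
    (List.getD_eq_getElem _ 0 h).symm
  rw [hd]
  exact rank_filter_range _ ids.length r h

---------------------------------------------------------------- group pass

lemma group_get? (l : List String) :
    ∀ (p : List String) (g : PySem.Dict String (List Int)),
      (∀ x, g.get? x = if natIdx p x = [] then none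
                       else some ((natIdx p x).map Int.ofNat)) →
      ∀ x, ((PySem.List.enumerate l (p.length : Int)).foldl groupStep g).get? x
        = if natIdx (p ++ l) x = [] then none
          else some ((natIdx (p ++ l) x).map Int.ofNat) := by
  induction l with
  | nil => intro p g hg x; simpa [PySem.List.enumerate_nil] using hg x
  | cons a l ih =>
    intro p g hg x
    rw [PySem.List.enumerate_cons, List.foldl_cons]
    have hstep : groupStep g ((p.length : Int), a)
        = g.insert a ((natIdx p a).map Int.ofNat ++ [(p.length : Int)]) := by
      unfold groupStep
      congr 1
      have := hg a
      by_cases ha : natIdx p a = []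
      · simp [PySem.Dict.getD, this, ha]
      · simp [PySem.Dict.getD, this, ha]
    have hinv : ∀ y, (g.insert a ((natIdx p a).map Int.ofNat ++ [(p.length : Int)])).get? y
        = if natIdx (p ++ [a]) y = [] then none
          else some ((natIdx (p ++ [a]) y).map Int.ofNat) := by
      intro y
      rw [natIdx_append_singleton]
      by_cases hy : y = a
      · subst hy
        simp [PySem.Dict.get?_insert_self]
      · rw [PySem.Dict.get?_insert_of_ne _ _ hy]
        simp [Ne.symm hy, hg y]
    have hlen : ((p.length : Int) + 1) = (((p ++ [a]).length : Nat) : Int) := by simp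
    have hpla : p ++ a :: l = (p ++ [a]) ++ l := by simp
    rw [hstep, hlen, hpla]
    exact ih (p ++ [a]) _ hinv x

lemma groups_spec (ids : List String) :
    ∀ x, ((PySem.List.enumerate ids 0).foldl groupStep PySem.Dict.empty).get? x
      = if natIdx ids x = [] then none
        else some ((natIdx ids x).map Int.ofNat) := by
  intro x
  have h0 : ((0 : Int)) = ((([] : List String).length : Nat) : Int) := by simp
  rw [h0]
  have := group_get? ids [] PySem.Dict.empty (by intro y; simp [natIdx])
  simpa using this x

lemma groups_nodup_keys (ids : List String) :
    ((PySem.List.enumerate ids 0).foldl groupStep PySem.Dict.empty).keys.Nodup := by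
  have := PySem.Dict.nodup_keys_foldl_insert_key (PySem.List.enumerate ids 0)
      (fun q => q.2) (fun g q => g.getD q.2 [] ++ [q.1]) PySem.Dict.empty
      (by simp)
  simpa [groupStep] using this

---------------------------------------------------------------- scatter pass

-- value written at the r-th position of id x
def wval (x : String) (r : Nat) : String :=
  if r = 0 then x else x ++ "-" ++ (Char.ofNat (97 + r)).toString

lemma inner_length (x : String) (t : List Int) :
    ∀ (s : Int) (o : List String),
      ((PySem.List.enumerate t s).foldl
        (fun o q => o.set q.2.toNat (x ++ "-" ++ (Char.ofNat (96 + q.1).toNat).toString)) o).length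
      = o.length := by
  induction t with
  | nil => intro s o; simp [PySem.List.enumerate_nil]
  | cons a t ih =>
    intro s o
    rw [PySem.List.enumerate_cons, List.foldl_cons, ih]
    simp

lemma inner_untouched (x : String) (t : List Nat) :
    ∀ (s : Int) (o : List String) (j : Nat), j ∉ t →
      ((PySem.List.enumerate (t.map Int.ofNat) s).foldl
        (fun o q => o.set q.2.toNat (x ++ "-" ++ (Char.ofNat (96 + q.1).toNat).toString)) o)[j]?
      = o[j]? := by
  induction t with
  | nil => intro s o j _; simp [PySem.List.enumerate_nil]
  | cons a t ih =>
    intro s o j hj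
    rw [List.map_cons, PySem.List.enumerate_cons, List.foldl_cons,
        ih (s+1) _ j (by simp at hj; exact hj.2)]
    have hja : j ≠ a := by simp at hj; exact hj.1
    simp [List.getElem?_set_ne, Ne.symm hja]

lemma inner_touched (x : String) (t : List Nat) :
    ∀ (s : Nat) (o : List String) (k : Nat) (j : Nat) (hk : k < t.length),
      t.Nodup → t[k] = j → j < o.length →
      ((PySem.List.enumerate (t.map Int.ofNat) (s : Int)).foldl
        (fun o q => o.set q.2.toNat (x ++ "-" ++ (Char.ofNat (96 + q.1).toNat).toString)) o)[j]?
      = some (x ++ "-" ++ (Char.ofNat (96 + s + k)).toString) := by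
  induction t with
  | nil => intro s o k j hk; simp at hk
  | cons a t ih =>
    intro s o k j hk hnd hkj hj
    rw [List.map_cons, PySem.List.enumerate_cons, List.foldl_cons]
    simp only [List.nodup_cons] at hnd
    cases k with
    | zero =>
      simp at hkj; subst hkj
      rw [inner_untouched x t _ _ a hnd.1]
      have : ((96 : Int) + (s : Int)).toNat = 96 + s := by omega
      simp [Int.toNat_natCast, hj, this]
    | succ k =>
      have hja : j ≠ a := by
        intro he; subst he
        exact hnd.1 (hkj ▸ List.getElem_mem (by simpa using hk))
      have hcast : ((s : Int) + 1) = (((s + 1 : Nat)) : Int) := by push_cast; ring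
      rw [hcast, ih (s+1) _ k j (by simpa using hk) hnd.2 (by simpa using hkj)
            (by simpa using hj)]
      have h96 : 96 + (s + 1) + k = 96 + s + (k + 1) := by omega
      rw [h96]

lemma writeGroup_length (out : List String) (p : String × List Int) :
    (writeGroup out p).length = out.length := by
  unfold writeGroup
  cases p.2 with
  | nil => rfl
  | cons i0 rest => rw [inner_length]; simp

lemma writeGroup_untouched (out : List String) (x : String) (m : List Nat) (j : Nat)
    (hj : j ∉ m) :
    (writeGroup out (x, m.map Int.ofNat))[j]? = out[j]? := by
  unfold writeGroup
  cases m with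
  | nil => rfl
  | cons n0 rest =>
    simp only [List.map_cons]
    rw [inner_untouched x rest 2 _ j (by simp at hj; exact hj.2)]
    have hjn : j ≠ n0 := by simp at hj; exact hj.1
    simp [List.getElem?_set_ne, Ne.symm hjn]

lemma writeGroup_touched (out : List String) (x : String) (m : List Nat) (r : Nat)
    (hr : r < m.length) (hnd : m.Nodup) (hj : m[r] < out.length) :
    (writeGroup out (x, m.map Int.ofNat))[m[r]]? = some (wval x r) := by
  unfold writeGroup
  cases m with
  | nil => simp at hr
  | cons n0 rest =>
    simp only [List.map_cons, List.nodup_cons] at hnd ⊢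
    cases r with
    | zero =>
      simp only [List.getElem_cons_zero] at hj ⊢
      rw [inner_untouched x rest 2 _ n0 hnd.1]
      simp [hj, wval]
    | succ r =>
      have h2 : ((2 : Int)) = ((2 : Nat) : Int) := by norm_num
      rw [h2, inner_touched x rest 2 _ r _ (by simpa using hr) hnd.2
            (by simp) (by simpa using hj)]
      simp only [wval, Nat.succ_ne_zero, if_false]
      have h96 : 96 + 2 + r = 97 + (r + 1) := by omega
      rw [h96]

lemma fill_length (grps : List (String × List Int)) :
    ∀ (out : List String), (grps.foldl writeGroup out).length = out.length := by
  induction grps with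
  | nil => intro out; rfl
  | cons p grps ih => intro out; rw [List.foldl_cons, ih, writeGroup_length]

lemma fill_untouched (ids : List String) (grps : List (String × List Int)) :
    ∀ (out : List String) (j : Nat),
      (∀ p ∈ grps, p.2 = (natIdx ids p.1).map Int.ofNat) →
      (∀ p ∈ grps, j ∉ natIdx ids p.1) →
      (grps.foldl writeGroup out)[j]? = out[j]? := by
  induction grps with
  | nil => intro out j _ _; rfl
  | cons p grps ih =>
    intro out j hsp hun
    rw [List.foldl_cons, ih _ j (fun q hq => hsp q (by simp [hq]))
          (fun q hq => hun q (by simp [hq]))]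
    have := hsp p (by simp)
    have hp : (p.1, p.2) = p := rfl
    rw [← hp, this, writeGroup_untouched out p.1 _ j (hun p (by simp))]

lemma fill_touched (ids : List String) (grps : List (String × List Int)) :
    ∀ (out : List String) (x : String) (r : Nat)
      (hr : r < (natIdx ids x).length),
      (∀ p ∈ grps, p.2 = (natIdx ids p.1).map Int.ofNat) →
      (grps.map Prod.fst).Nodup →
      (x, (natIdx ids x).map Int.ofNat) ∈ grps →
      (natIdx ids x)[r] < out.length →
      (grps.foldl writeGroup out)[(natIdx ids x)[r]]? = some (wval x r) := by
  induction grps with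
  | nil => intro out x r hr _ _ hmem _; simp at hmem
  | cons p grps ih =>
    intro out x r hr hsp hnd hmem hlen
    simp only [List.map_cons, List.nodup_cons] at hnd
    rw [List.foldl_cons]
    by_cases hx : p.1 = x
    · -- this group writes position (natIdx ids x)[r]
      have hp2 : p.2 = (natIdx ids x).map Int.ofNat := by
        rw [hsp p (by simp), hx]
      -- no later group touches it
      have hun : ∀ q ∈ grps, (natIdx ids x)[r] ∉ natIdx ids q.1 := by
        intro q hq hmm
        have h1 := (mem_natIdx hmm).2
        have h2 := (mem_natIdx (List.getElem_mem hr)).2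
        have : q.1 = x := by rw [← h1, h2]
        exact hnd.1 (List.mem_map.mpr ⟨q, hq, this.trans hx.symm⟩)
      rw [fill_untouched ids grps _ _ (fun q hq => hsp q (by simp [hq])) hun]
      have hp : (p.1, p.2) = p := rfl
      rw [← hp, hp2, hx,
          writeGroup_touched out x (natIdx ids x) r hr (nodup_natIdx ids x) hlen]
    · -- this group does not touch it
      have hmem' : (x, (natIdx ids x).map Int.ofNat) ∈ grps := by
        rcases List.mem_cons.mp hmem with h | h
        · exact absurd (congrArg Prod.fst h).symm hx
        · exact h
      have hnot : (natIdx ids x)[r] ∉ natIdx ids p.1 := by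
        intro hmm
        have h1 := (mem_natIdx hmm).2
        have h2 := (mem_natIdx (List.getElem_mem hr)).2
        exact hx (by rw [← h1, h2])
      have hlen' : (natIdx ids x)[r] < (writeGroup out p).length := by
        rw [writeGroup_length]; exact hlen
      rw [ih _ x r hr (fun q hq => hsp q (by simp [hq])) hnd.2 hmem' hlen']

---------------------------------------------------------------- B = refB

lemma alt_eq_refB (ids : List String) : rename_duplicate_IDs_alt ids = refB ids := by
  unfold rename_duplicate_IDs_alt
  set G := (PySem.List.enumerate ids 0).foldl groupStep PySem.Dict.empty with hG
  have hnd := groups_nodup_keys ids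
  have hspec := groups_spec ids
  -- every stored group is (x, positions of x)
  have hsp : ∀ p ∈ G.items, p.2 = (natIdx ids p.1).map Int.ofNat := by
    intro p hp
    have := PySem.Dict.get?_of_mem_items G hp hnd
    rw [hspec p.1] at this
    by_cases h : natIdx ids p.1 = []
    · simp [h] at this
    · simp only [h, if_false] at this
      exact (Option.some_injective _ this.symm)
  have hkeys : (G.items.map Prod.fst).Nodup := hnd
  have hlenalt : (G.items.foldl writeGroup (List.replicate ids.length "")).length
      = ids.length := by rw [fill_length]; simp
  have hlenref : (refB ids).length = ids.length := by
    unfold refB; rw [List.length_map, PySem.List.length_enumerate]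
  apply List.ext_getElem?
  intro j
  by_cases hj : j < ids.length
  · -- position j belongs to the group of x := ids[j]
    have hgd : ids.getD j "" = ids[j] := List.getD_eq_getElem ids "" hj
    set x := ids[j] with hx
    have hjmem : j ∈ natIdx ids x := by
      unfold natIdx
      simp only [List.mem_filter, List.mem_range, beq_iff_eq]
      exact ⟨hj, hgd⟩
    obtain ⟨r, hr, hrj⟩ := List.mem_iff_getElem.mp hjmem
    have hne : natIdx ids x ≠ [] := List.ne_nil_of_mem hjmem
    have hmem : (x, (natIdx ids x).map Int.ofNat) ∈ G.items := by
      apply PySem.Dict.mem_items_of_get?_eq_some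
      rw [hspec x]; simp [hne]
    have hA := fill_touched ids G.items (List.replicate ids.length "") x r hr hsp hkeys hmem
        (by rw [hrj]; simpa using hj)
    rw [hrj] at hA
    rw [hA]
    -- compute refB at j
    have hrefj : (refB ids)[j]? = some (wval x r) := by
      unfold refB
      rw [List.getElem?_map, PySem.List.getElem?_enumerate,
          List.getElem?_eq_getElem hj]
      simp only [Option.map_some]
      have hslice : PySem.List.slice ids none (some ((0 : Int) + (j : Nat))) = ids.take j := by
        rw [zero_add, PySem.List.slice_to_natCast]
      rw [hslice]
      have hcnt : (ids.take j).count (ids[j]) = r := by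
        rw [← hx]
        have := rank_natIdx ids x r hr
        rw [hrj] at this; exact this
      simp only [hcnt, wval, hx]
    rw [hrefj]
  · rw [List.getElem?_eq_none (by rw [hlenalt]; omega),
        List.getElem?_eq_none (by rw [hlenref]; omega)]

-- ===== VERDICT (by name: the statement is the Claim_ definition above) =====
theorem rename_duplicate_IDs_spec : Claim_equal_rename_duplicate_IDs := by
  intro ids _
  unfold Spec_rename_duplicate_IDs
  rw [A_eq_gRen, alt_eq_refB, refB_eq_gRen]
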